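-- pv_equiv track=rewrite | github.com/joshanashakya/dissertation | workspace/dataset/java-python/GeeksForGeeks/5066/A/2.py | canBeBalanced
-- ===== SOURCE A (Python) =====
-- def canBeBalanced(s, n):
--
--     # Count to check the difference between
--     # the frequencies of '(' and ')' and
--     # count_1 is to find the minimum value
--     # of freq('(') - freq(')')
--     count = 0
--     count_1 = 0
--
--     # Traverse the given string
--     for i in range(n):
--
--         # Increase the count
--         if (s[i] == '('):
--             count += 1
--
--         # Decrease the count
--         else:
--             count -= 1
--
--         # Find the minimum value
--         # of freq('(') - freq(')')
--         count_1 = min(count_1, count)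
--
--     # If the minimum difference is greater
--     # than or equal to -1 and the overall
--     # difference is zero
--     if (count_1 >= -1 and count == 0):
--         return True
--
--     return False
-- ===== SOURCE B (Python) =====
-- def canBeBalanced(s, n):
--     # Greedy stack matching with early exit: each ')' cancels an open '(' if
--     # one is available; a single unmatched ')' is tolerated (it can be swapped),
--     # a second one ends the scan immediately with False. At the end the string
--     # is balanceable iff the leftover opens exactly pay for the tolerated ')'.
--     open_ = 0
--     seen_unmatched = False
--     for i in range(n):
--         if s[i] == '(':
--             open_ += 1
--         elif open_ > 0:
--             open_ -= 1
--         elif seen_unmatched: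
--             return False
--         else:
--             seen_unmatched = True
--     return open_ == (1 if seen_unmatched else 0)
-- ===== Notes on version B (the rewrite author's own statement) =====
-- stated objective: alternative
-- what changed: B replaces A's prefix-balance scan with running minimum by greedy stack matching: ')' cancels an open '(', one unmatched ')' is tolerated as the swap target, a second unmatched ')' returns False early, and the final test is open == unmatched instead of min>=-1 and sum==0.
import Mathlib
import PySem

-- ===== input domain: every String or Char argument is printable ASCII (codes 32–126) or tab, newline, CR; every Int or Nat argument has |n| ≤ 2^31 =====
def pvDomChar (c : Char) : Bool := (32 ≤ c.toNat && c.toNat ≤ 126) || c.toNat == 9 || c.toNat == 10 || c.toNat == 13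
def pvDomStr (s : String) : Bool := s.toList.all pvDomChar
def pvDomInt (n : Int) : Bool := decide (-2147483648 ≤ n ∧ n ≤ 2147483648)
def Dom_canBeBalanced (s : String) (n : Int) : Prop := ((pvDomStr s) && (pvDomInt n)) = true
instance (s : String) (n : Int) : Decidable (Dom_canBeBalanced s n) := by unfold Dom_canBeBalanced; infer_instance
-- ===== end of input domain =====

-- B replaces A's prefix-balance + running-minimum scan by greedy stack matching with
-- early exit (one unmatched ')' tolerated; a second returns False immediately): an
-- alternative algorithm of the same O(n) cost.


-- ===== PORT A =====
-- A's loop body: running count and running minimum count_1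
def aStep (s : String) (p : Int × Int) (i : Int) : Int × Int :=
  let count := if PySem.Str.pyGet? s i = some '(' then p.1 + 1 else p.1 - 1
  (count, min p.2 count)

-- literal port of A: one loop over range(n), then the final test on (count, count_1)
def canBeBalanced (s : String) (n : Int) : Bool :=
  let st := (PySem.List.pyRange 0 n 1).foldl (aStep s) (0, 0)
  decide (st.2 ≥ -1 ∧ st.1 = 0)

-- ===== PORT B =====
-- literal port of Source B's loop with its early return, as structural recursion over the
-- remaining indices: state = (open_, seen_unmatched)
def bGo (s : String) : List Int → Int → Bool → Bool
  | [], op, seen => decide (op = (if seen then (1 : Int) else 0))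
  | i :: t, op, seen =>
    if PySem.Str.pyGet? s i = some '(' then bGo s t (op + 1) seen
    else if op > 0 then bGo s t (op - 1) seen
    else if seen then false
    else bGo s t op true

def canBeBalanced_alt (s : String) (n : Int) : Bool :=
  bGo s (PySem.List.pyRange 0 n 1) 0 false

-- ===== PRECONDITION & SPEC =====
-- Pre_ excludes exactly the inputs where Python A raises IndexError: n beyond the string length.
def Pre_canBeBalanced (s : String) (n : Int) : Prop := n ≤ (s.toList.length : Int)
instance (s : String) (n : Int) : Decidable (Pre_canBeBalanced s n) := by unfold Pre_canBeBalanced; infer_instance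
def pvWitness_canBeBalanced : String × Int := ("(())", 4)
def Spec_canBeBalanced (s : String) (n : Int) (out : Bool) : Prop := out = canBeBalanced_alt s n
instance (s : String) (n : Int) (out : Bool) : Decidable (Spec_canBeBalanced s n out) := by unfold Spec_canBeBalanced; infer_instance

-- ===== CLAIM (what is proved, stated in full; the proofs are below) =====
def Claim_equal_canBeBalanced : Prop := ∀ (s : String) (n : Int), Dom_canBeBalanced s n → Pre_canBeBalanced s n → Spec_canBeBalanced s n (canBeBalanced s n)

-- ===== LEMMAS AND PROOFS =====

-- A's running minimum never increases along the fold
theorem aFold_snd_le (s : String) (L : List Int) : ∀ (c m : Int),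
    (L.foldl (aStep s) (c, m)).2 ≤ m := by
  induction L with
  | nil => intro c m; simp
  | cons i t ih =>
    intro c m
    simp only [List.foldl_cons, aStep]
    exact le_trans (ih _ _) (min_le_left _ _)

-- the key invariant: B's greedy state (open_, seen) determines A's state as
-- (open_ - u, -u) with u = 1 if seen else 0, and both reach the same verdict
theorem bGo_eq_fold (s : String) (L : List Int) : ∀ (op : Int) (seen : Bool), 0 ≤ op →
    bGo s L op seen =
      (let u : Int := if seen then 1 else 0
       let r := L.foldl (aStep s) (op - u, -u)
       decide (r.2 ≥ -1 ∧ r.1 = 0)) := by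
  induction L with
  | nil =>
    intro op seen hop
    cases seen <;> simp [bGo, decide_eq_decide] <;> omega
  | cons i t ih =>
    intro op seen hop
    simp only [bGo, List.foldl_cons, aStep]
    set u : Int := if seen then 1 else 0 with hu
    have hu01 : u = 0 ∨ u = 1 := by cases seen <;> simp [hu]
    by_cases hc : PySem.Str.pyGet? s i = some '('
    · simp only [hc, if_true]
      have hmin : min (-u) (op - u + 1) = -u := by
        rcases hu01 with h | h <;> rw [h] <;> exact min_eq_left (by omega)
      rw [hmin, ih (op + 1) seen (by omega)]
      have : op - u + 1 = op + 1 - u := by ring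
      rw [this]
    · simp only [if_neg hc]
      by_cases hop' : op > 0
      · rw [if_pos hop']
        have hmin : min (-u) (op - u - 1) = -u := by
          rcases hu01 with h | h <;> rw [h] <;> exact min_eq_left (by omega)
        rw [hmin, ih (op - 1) seen (by omega)]
        have : op - u - 1 = op - 1 - u := by ring
        rw [this]
      · have hop0 : op = 0 := by omega
        simp only [if_neg hop']
        cases seen with
        | false =>
          simp only [if_neg Bool.false_ne_true]
          have hu0 : u = 0 := by simp [hu]
          rw [ih op true hop]
          subst hop0
          norm_num [hu0]
        | true =>
          have hu1 : u = 1 := by simp [hu]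
          subst hop0
          rw [hu1]
          have hmin : min (-(1 : Int)) (0 - 1 - 1) = -2 := by decide
          rw [hmin]
          simp only [if_true]
          have hle := aFold_snd_le s t (0 - 1 - 1) (-2)
          rw [eq_comm, decide_eq_false_iff_not]
          intro hcon
          omega

-- ===== VERDICT (by name: the statement is the Claim_ definition above) =====
theorem canBeBalanced_spec : Claim_equal_canBeBalanced := by
  intro s n _ _
  unfold Spec_canBeBalanced canBeBalanced canBeBalanced_alt
  rw [bGo_eq_fold s _ 0 false le_rfl]
  norm_num
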